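-- pv_equiv track=rewrite | github.com/ciaranmcveigh5/scripts | codewars/peaks.py | nextLowestPeakPosition
-- ===== SOURCE A (Python) =====
-- def nextLowestPeakPosition(array, position):
--     if position != len(array) - 1:
--         if array[position + 1] < array[position]:
--             return nextLowestPeakPosition(array, position + 1)
--         else:
--             return position
--     else:
--         return position
-- ===== SOURCE B (Python) =====
-- def nextLowestPeakPosition(array, position):
--     n = len(array)
--     while position != n - 1 and array[position + 1] < array[position]:
--         position += 1
--     return position
-- ===== Notes on version B (the rewrite author's own statement) =====
-- stated objective: idiomatic
-- what changed: Replaced A's tail recursion with an explicit iterative while loop maintaining a single moving index (same short-circuit test order), removing the call stack.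
import Mathlib
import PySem

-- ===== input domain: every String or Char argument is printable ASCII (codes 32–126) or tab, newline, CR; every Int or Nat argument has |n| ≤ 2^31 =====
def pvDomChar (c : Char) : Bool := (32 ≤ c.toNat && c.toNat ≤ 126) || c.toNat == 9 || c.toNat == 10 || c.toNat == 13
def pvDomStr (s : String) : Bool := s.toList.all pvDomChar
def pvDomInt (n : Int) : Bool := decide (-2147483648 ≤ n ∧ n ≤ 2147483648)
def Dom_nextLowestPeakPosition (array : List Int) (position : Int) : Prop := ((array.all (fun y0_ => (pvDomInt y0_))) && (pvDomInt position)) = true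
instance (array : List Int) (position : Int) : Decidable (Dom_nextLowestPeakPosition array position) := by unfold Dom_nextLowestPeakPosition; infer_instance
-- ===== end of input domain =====

-- B replaces A's tail recursion by an explicit while loop with a single moving index
-- (same short-circuit test order); objective: idiomatic iterative decomposition, same cost.

-- ===== PORT A =====
-- literal port of A's recursion; where Python raises IndexError (pyGet? = none,
-- excluded by Pre_) the port returns `position`.
def nextLowestPeakPosition (array : List Int) (position : Int) : Int :=
  if position ≠ (array.length : Int) - 1 then
    match h1 : PySem.List.pyGet? array (position + 1), PySem.List.pyGet? array position with
    | some a, some b =>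
      if a < b then nextLowestPeakPosition array (position + 1) else position
    | _, _ => position
  else
    position
termination_by ((array.length : Int) - 1 - position).natAbs
decreasing_by
  have hin : PySem.Raise.InRange array.length (position + 1) := by
    by_contra hc
    rw [← PySem.List.pyGet?_eq_none_iff] at hc
    simp [hc] at h1
  unfold PySem.Raise.InRange at hin
  omega

-- ===== PORT B =====
-- port of Source B's while-loop condition: `position != n - 1 and array[position+1] < array[position]`
def nlppCond (array : List Int) (n position : Int) : Bool :=
  (position != n - 1) &&
    (match PySem.List.pyGet? array (position + 1) with
     | none => false
     | some a =>
       match PySem.List.pyGet? array position with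
       | none => false
       | some b => a < b)

-- the loop condition can only hold when index position+1 is in range (used for termination)
theorem nlppCond_inRange {array : List Int} {n position : Int}
    (h : nlppCond array n position = true) :
    PySem.Raise.InRange array.length (position + 1) := by
  by_contra hc
  rw [← PySem.List.pyGet?_eq_none_iff] at hc
  simp [nlppCond, hc] at h

-- the while loop: one moving index
def nlppLoop (array : List Int) (n position : Int) : Int :=
  if h : nlppCond array n position = true then
    nlppLoop array n (position + 1)
  else
    position
termination_by ((array.length : Int) - 1 - position).natAbs
decreasing_by
  have hin := nlppCond_inRange h
  unfold PySem.Raise.InRange at hin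
  omega

def nextLowestPeakPosition_alt (array : List Int) (position : Int) : Int :=
  nlppLoop array (array.length : Int) position

-- ===== PRECONDITION & SPEC =====
-- Pre_ excludes exactly the inputs on which Python A raises IndexError
-- (position out of Python's index range and not equal to len(array)-1).
def Pre_nextLowestPeakPosition (array : List Int) (position : Int) : Prop :=
  position = (array.length : Int) - 1 ∨
    (-(array.length : Int) ≤ position ∧ position < (array.length : Int))
instance (array : List Int) (position : Int) : Decidable (Pre_nextLowestPeakPosition array position) := by
  unfold Pre_nextLowestPeakPosition; infer_instance

def pvWitness_nextLowestPeakPosition : List Int × Int := ([5, 3, 2, 4], 0)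

def Spec_nextLowestPeakPosition (array : List Int) (position : Int) (out : Int) : Prop := out = nextLowestPeakPosition_alt array position
instance (array : List Int) (position : Int) (out : Int) : Decidable (Spec_nextLowestPeakPosition array position out) := by unfold Spec_nextLowestPeakPosition; infer_instance

-- ===== CLAIM (what is proved, stated in full; the proofs are below) =====
def Claim_equal_nextLowestPeakPosition : Prop := ∀ (array : List Int) (position : Int), Dom_nextLowestPeakPosition array position → Pre_nextLowestPeakPosition array position → Spec_nextLowestPeakPosition array position (nextLowestPeakPosition array position)

-- ===== LEMMAS AND PROOFS =====

-- A's recursion and B's loop compute the same value on every input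
theorem nlpp_eq_loop (array : List Int) (position : Int) :
    nextLowestPeakPosition array position = nlppLoop array (array.length : Int) position := by
  refine nextLowestPeakPosition.induct array
    (motive := fun p => nextLowestPeakPosition array p = nlppLoop array (array.length : Int) p)
    ?_ ?_ ?_ ?_ position
  · intro p hne a b h1 h2 hlt ih
    have hc : nlppCond array (array.length : Int) p = true := by
      simp [nlppCond, h1, h2, hlt, hne]
    rw [nextLowestPeakPosition, if_pos hne, nlppLoop, dif_pos hc]
    split
    · rename_i a' b' e1 e2
      rw [h1] at e1; rw [h2] at e2
      cases e1; cases e2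
      rw [if_pos hlt, ih]
    · rename_i hno
      exact (hno a b h1 h2).elim
  · intro p hne a b h1 h2 hlt
    have hc : nlppCond array (array.length : Int) p = false := by
      simp [nlppCond, h1, h2, hlt]
    rw [nextLowestPeakPosition, if_pos hne, nlppLoop, dif_neg (by simp [hc])]
    split
    · rename_i a' b' e1 e2
      rw [h1] at e1; rw [h2] at e2
      cases e1; cases e2
      rw [if_neg hlt]
    · rename_i hno
      exact (hno a b h1 h2).elim
  · intro p hne hno
    have hc : nlppCond array (array.length : Int) p = false := by
      cases e1 : PySem.List.pyGet? array (p + 1) with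
      | none => simp [nlppCond, e1]
      | some a =>
        cases e2 : PySem.List.pyGet? array p with
        | none => simp [nlppCond, e1, e2]
        | some b => exact (hno a b e1 e2).elim
    rw [nextLowestPeakPosition, if_pos hne, nlppLoop, dif_neg (by simp [hc])]
    split
    · rename_i a b e1 e2
      exact (hno a b e1 e2).elim
    · rfl
  · intro p hne
    have hc : nlppCond array (array.length : Int) p = false := by
      simp [nlppCond]
      intro h; exact (hne h).elim
    rw [nextLowestPeakPosition, if_neg hne, nlppLoop, dif_neg (by simp [hc])]

-- ===== VERDICT (by name: the statement is the Claim_ definition above) =====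
theorem nextLowestPeakPosition_spec : Claim_equal_nextLowestPeakPosition := by
  intro array position _ _
  unfold Spec_nextLowestPeakPosition nextLowestPeakPosition_alt
  exact nlpp_eq_loop array position
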